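-- pv_equiv track=rewrite | github.com/alesjar/tfm | python/.ipynb_checkpoints/aux_functions-checkpoint.py | max_len_elems
-- ===== SOURCE A (Python) =====
-- def max_len_elems(list):
--     max_len_elems = []
--     n = 0
--     for x in list:
--         m = len(x)
--         if m>n:
--             n = m
--             max_len_elems = [x]
--         else:
--             max_len_elems.append(x)
--     return max_len_elems
-- ===== SOURCE B (Python) =====
-- def max_len_elems(list):
--     split = 0
--     n = 0
--     for i, x in enumerate(list):
--         if len(x) > n:
--             n = len(x)
--             split = i
--     return list[split:]
-- ===== Notes on version B (the rewrite author's own statement) =====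
-- stated objective: simpler
-- what changed: B replaces A's accumulate/reset list building with a single pass that only tracks the index of the last new-maximum element and slices the suffix afterwards.
import Mathlib
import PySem

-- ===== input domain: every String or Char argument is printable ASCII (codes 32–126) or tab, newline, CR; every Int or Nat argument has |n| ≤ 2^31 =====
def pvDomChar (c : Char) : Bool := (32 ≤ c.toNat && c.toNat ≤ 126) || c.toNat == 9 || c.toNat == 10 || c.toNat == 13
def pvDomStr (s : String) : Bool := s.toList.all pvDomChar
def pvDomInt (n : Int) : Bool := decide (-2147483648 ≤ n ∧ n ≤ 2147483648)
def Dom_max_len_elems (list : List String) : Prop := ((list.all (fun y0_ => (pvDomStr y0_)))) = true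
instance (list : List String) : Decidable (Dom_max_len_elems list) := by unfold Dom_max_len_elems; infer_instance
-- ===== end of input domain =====

-- B replaces A's accumulate/reset list building with a single pass tracking only the index of the
-- last new-maximum element, then returns the suffix from that index (objective: simpler).

-- ===== PORT A =====
-- A's loop: state is (accumulated list, running max n); reset to [x] on a new max, append otherwise.
def max_len_elems (list : List String) : List String :=
  (list.foldl
    (fun (st : List String × Nat) (x : String) =>
      let m := x.length
      if m > st.2 then ([x], m) else (st.1 ++ [x], st.2))
    ([], 0)).1

-- ===== PORT B =====
-- B's loop over enumerate(list): state is (split, n); after the loop, list[split:].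
-- list[split:] with 0 ≤ split is exactly List.drop split (PySem slice_from on a Nat bound).
def max_len_elems_alt (list : List String) : List String :=
  let st := (list.zipIdx).foldl
    (fun (st : Nat × Nat) (ix : String × Nat) =>
      if ix.1.length > st.2 then (ix.2, ix.1.length) else st)
    (0, 0)
  list.drop st.1

-- ===== PRECONDITION & SPEC =====
def Spec_max_len_elems (list : List String) (out : List String) : Prop := out = max_len_elems_alt list
instance (list : List String) (out : List String) : Decidable (Spec_max_len_elems list out) := by unfold Spec_max_len_elems; infer_instance

-- ===== CLAIM (what is proved, stated in full; the proofs are below) =====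
def Claim_equal_max_len_elems : Prop := ∀ (list : List String), Dom_max_len_elems list → Spec_max_len_elems list (max_len_elems list)

-- ===== LEMMAS AND PROOFS =====

-- S n l = some suffix-from-last-reset (last index with length strictly above the running max), none if no reset.
def pvS (n : Nat) : List String → Option (List String)
  | [] => none
  | x :: xs => if x.length > n then some ((pvS x.length xs).getD (x :: xs)) else pvS n xs

-- T n l = relative index of the last reset, none if no reset.
def pvT (n : Nat) : List String → Option Nat
  | [] => none
  | x :: xs =>
    if x.length > n then some (((pvT x.length xs).map (· + 1)).getD 0)
    else (pvT n xs).map (· + 1)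

-- running-max after the fold (shared by both ports' states)
def pvN (n : Nat) : List String → Nat
  | [] => n
  | x :: xs => if x.length > n then pvN x.length xs else pvN n xs

theorem pvA_fold (xs : List String) : ∀ (acc : List String) (n : Nat),
    (xs.foldl
      (fun (st : List String × Nat) (x : String) =>
        let m := x.length
        if m > st.2 then ([x], m) else (st.1 ++ [x], st.2))
      (acc, n)).1 = (pvS n xs).getD (acc ++ xs) := by
  induction xs with
  | nil => intro acc n; simp [pvS]
  | cons x xs ih =>
    intro acc n
    by_cases h : x.length > n
    · simp [List.foldl_cons, pvS, h, ih]
    · simp [List.foldl_cons, pvS, h, ih]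

theorem pvB_fold (xs : List String) : ∀ (k s n : Nat),
    (xs.zipIdx k).foldl
      (fun (st : Nat × Nat) (ix : String × Nat) =>
        if ix.1.length > st.2 then (ix.2, ix.1.length) else st)
      (s, n) = ((pvT n xs).elim s (k + ·), pvN n xs) := by
  induction xs with
  | nil => intro k s n; simp [pvT, pvN]
  | cons x xs ih =>
    intro k s n
    by_cases h : x.length > n
    · rw [List.zipIdx_cons, List.foldl_cons]
      simp only [h, if_pos, pvT, pvN]
      rw [ih (k + 1) k x.length]
      cases hT : pvT x.length xs with
      | none => simp [hT, h]
      | some i => simp [hT, h]; omega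
    · rw [List.zipIdx_cons, List.foldl_cons]
      simp only [pvT, pvN, h]
      rw [if_neg (by simpa using h), ih (k + 1) s n]
      cases hT : pvT n xs with
      | none => simp
      | some i => simp; omega

theorem pvS_isSome (n : Nat) (l : List String) : (pvS n l).isSome = (pvT n l).isSome := by
  induction l generalizing n with
  | nil => simp [pvS, pvT]
  | cons x xs ih =>
    by_cases h : x.length > n
    · simp [pvS, pvT, h]
    · simp [pvS, pvT, h, ih n]

theorem pvST (l : List String) : ∀ (n : Nat),
    (pvS n l).getD l = l.drop ((pvT n l).elim 0 id) := by
  induction l with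
  | nil => intro n; simp [pvS, pvT]
  | cons x xs ih =>
    intro n
    by_cases h : x.length > n
    · simp only [pvS, pvT, h, if_pos]
      cases hT : pvT x.length xs with
      | none =>
        have hS : pvS x.length xs = none := by
          have := pvS_isSome x.length xs; rw [hT] at this
          cases hS' : pvS x.length xs <;> simp [hS'] at this ⊢
        simp [hS, hT]
      | some i =>
        have hS : (pvS x.length xs).isSome := by rw [pvS_isSome, hT]; rfl
        obtain ⟨v, hv⟩ := Option.isSome_iff_exists.mp hS
        have := ih x.length
        rw [hv, hT] at this
        simp at this
        simp [hv, this]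
    · simp only [pvS, pvT, h, if_neg, ite_false]
      cases hT : pvT n xs with
      | none =>
        have hS : pvS n xs = none := by
          have := pvS_isSome n xs; rw [hT] at this
          cases hS' : pvS n xs <;> simp [hS'] at this ⊢
        simp [hS]
      | some i =>
        have hS : (pvS n xs).isSome := by rw [pvS_isSome, hT]; rfl
        obtain ⟨v, hv⟩ := Option.isSome_iff_exists.mp hS
        have := ih n
        rw [hv, hT] at this
        simp at this
        simp [hv, this]

-- ===== VERDICT (by name: the statement is the Claim_ definition above) =====
theorem max_len_elems_spec : Claim_equal_max_len_elems := by
  intro list _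
  unfold Spec_max_len_elems max_len_elems max_len_elems_alt
  rw [pvA_fold list [] 0, pvB_fold list 0 0 0]
  simpa using pvST list 0
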